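-- pv_equiv track=rewrite | github.com/pypi-data/pypi-mirror-62 | packages/esy-osm-shape/esy-osm-shape-0.0.2.tar.gz/esy-osm-shape-0.0.2/src/esy/osm/shape/shape.py | merge_segments_to_rings
-- ===== SOURCE A (Python) =====
-- def merge_segments_to_rings(segments, candidate=None, assigned=None):
--     '''
--     Iterates all rings that can be merged from segments. Note that rings are not
--     necessarily linear.
--     '''
--     if not candidate:
--         candidate, assigned = segments[0], set([0])
--
--     if candidate[0] == candidate[-1]:
--         yield candidate, assigned
--
--     for idx, segment in enumerate(segments):
--         if idx in assigned:
--             continue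
--
--         if candidate[-1] == segment[0]:
--             yield from merge_segments_to_rings(
--                 segments, candidate + segment[1:], assigned | set([idx])
--             )
--         elif candidate[-1] == segment[-1]:
--             yield from merge_segments_to_rings(
--                 segments, candidate + segment[:-1][::-1], assigned | set([idx])
--             )
-- ===== SOURCE B (Python) =====
-- def merge_segments_to_rings(segments, candidate=None, assigned=None):
--     '''
--     Iterates all rings that can be merged from segments, via an explicit
--     LIFO stack instead of recursive `yield from`.
--     '''
--     if not candidate:
--         candidate, assigned = segments[0], set([0])
--
--     stack = [(candidate, assigned)]
--     while stack:
--         cand, used = stack.pop()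
--         if cand[0] == cand[-1]:
--             yield cand, used
--
--         children = []
--         for idx, segment in enumerate(segments):
--             if idx in used:
--                 continue
--             if cand[-1] == segment[0]:
--                 children.append((cand + segment[1:], used | set([idx])))
--             elif cand[-1] == segment[-1]:
--                 children.append((cand + segment[:-1][::-1], used | set([idx])))
--         stack.extend(reversed(children))
-- ===== Notes on version B (the rewrite author's own statement) =====
-- stated objective: alternative
-- what changed: The recursive generator (nested `yield from` calls) is replaced by an iterative DFS with an explicit LIFO stack: pop a state, yield it if it is a ring, compute all valid extensions in one pass and push them in reverse index order so states pop in the recursion's pre-order.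
-- outside the precondition, e.g. on merge_segments_to_rings([], [1, 1], None): A returns [([1, 1], None)], B returns [([1, 1], None)]
import Mathlib
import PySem

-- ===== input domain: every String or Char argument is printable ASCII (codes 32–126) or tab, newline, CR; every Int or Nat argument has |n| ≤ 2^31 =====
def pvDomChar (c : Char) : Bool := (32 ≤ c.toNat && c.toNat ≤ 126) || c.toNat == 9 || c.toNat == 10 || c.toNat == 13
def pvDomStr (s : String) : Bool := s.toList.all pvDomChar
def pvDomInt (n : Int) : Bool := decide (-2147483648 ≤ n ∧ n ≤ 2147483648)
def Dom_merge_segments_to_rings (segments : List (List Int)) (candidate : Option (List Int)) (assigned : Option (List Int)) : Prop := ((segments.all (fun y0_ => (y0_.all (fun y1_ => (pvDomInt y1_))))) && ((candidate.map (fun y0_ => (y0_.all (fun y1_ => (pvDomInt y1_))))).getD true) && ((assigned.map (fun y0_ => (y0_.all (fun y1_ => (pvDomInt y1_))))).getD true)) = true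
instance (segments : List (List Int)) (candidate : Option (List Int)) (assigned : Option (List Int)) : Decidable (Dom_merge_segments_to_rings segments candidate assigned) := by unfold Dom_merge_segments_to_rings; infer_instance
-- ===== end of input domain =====

-- B replaces A's recursive generator by an explicit LIFO stack loop (same yield order); equivalence is about the returned sequence of (ring, assigned-set) pairs.

-- ===== PORT A =====
-- Recursion of A, with a fuel counter as a totality guard only: each recursive call
-- adds one fresh in-range index to `asg`, so depth ≤ segments.length and the top-level
-- fuel (segments.length + 1) is never exhausted.
def pvMergeRec (segments : List (List Int)) : Nat → List Int → List Int → List (List Int × List Int)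
  | 0, _, _ => []
  | fuel+1, cand, asg =>
    -- if candidate[0] == candidate[-1]: yield candidate, assigned
    (if PySem.List.pyGet? cand 0 = PySem.List.pyGet? cand (-1) then [(cand, asg)] else [])
    ++ (PySem.List.enumerate segments 0).flatMap (fun p =>
        if PySem.Set.contains asg p.1 then []
        else if PySem.List.pyGet? cand (-1) = PySem.List.pyGet? p.2 0 then
          -- candidate + segment[1:], assigned | set([idx])
          pvMergeRec segments fuel (cand ++ PySem.List.slice p.2 (some 1) none)
            (PySem.Set.union asg (PySem.Set.ofList [p.1]))
        else if PySem.List.pyGet? cand (-1) = PySem.List.pyGet? p.2 (-1) then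
          -- candidate + segment[:-1][::-1]  ([::-1] is reverse, PySem.List.slice?_none_none_neg_one)
          pvMergeRec segments fuel (cand ++ (PySem.List.slice p.2 none (some (-1))).reverse)
            (PySem.Set.union asg (PySem.Set.ofList [p.1]))
        else [])

def merge_segments_to_rings (segments : List (List Int)) (candidate : Option (List Int)) (assigned : Option (List Int)) : List (List Int × List Int) :=
  -- if not candidate: candidate, assigned = segments[0], set([0])   (segments[0] exists under Pre_)
  let init : List Int × List Int :=
    match candidate with
    | none => ((PySem.List.pyGet? segments 0).getD [], ([0] : List Int))
    | some [] => ((PySem.List.pyGet? segments 0).getD [], ([0] : List Int))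
    | some c => (c, assigned.getD [])
  pvMergeRec segments (segments.length + 1) init.1 init.2

-- ===== PORT B =====
-- children = all valid extensions of (cand, used), in ascending index order
def pvExtensions (segments : List (List Int)) (cand : List Int) (used : List Int) : List (List Int × List Int) :=
  (PySem.List.enumerate segments 0).filterMap (fun p =>
    if PySem.Set.contains used p.1 then none
    else if PySem.List.pyGet? cand (-1) = PySem.List.pyGet? p.2 0 then
      some (cand ++ PySem.List.slice p.2 (some 1) none, PySem.Set.union used (PySem.Set.ofList [p.1]))
    else if PySem.List.pyGet? cand (-1) = PySem.List.pyGet? p.2 (-1) then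
      some (cand ++ (PySem.List.slice p.2 none (some (-1))).reverse, PySem.Set.union used (PySem.Set.ofList [p.1]))
    else none)

-- B's while loop; the stack's head is its top (stack.pop(); stack.extend(reversed(children))
-- makes the new stack = children ++ rest). Fuel is a totality guard only: the DFS visits
-- at most (segments.length + 2)! states (see the factorial bound proved below).
def pvStackLoop (segments : List (List Int)) : Nat → List (List Int × List Int) → List (List Int × List Int)
  | 0, _ => []
  | _+1, [] => []
  | fuel+1, (cand, used) :: rest =>
    (if PySem.List.pyGet? cand 0 = PySem.List.pyGet? cand (-1) then [(cand, used)] else [])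
    ++ pvStackLoop segments fuel (pvExtensions segments cand used ++ rest)

def merge_segments_to_rings_alt (segments : List (List Int)) (candidate : Option (List Int)) (assigned : Option (List Int)) : List (List Int × List Int) :=
  -- `if not candidate` — candidate is falsy iff it is None or the empty list
  let init : List Int × List Int :=
    if candidate = none ∨ candidate = some [] then ((PySem.List.pyGet? segments 0).getD [], ([0] : List Int))
    else (candidate.getD [], assigned.getD [])
  pvStackLoop segments (Nat.factorial (segments.length + 2)) [init]

-- ===== PRECONDITION & SPEC =====
-- Pre_ excludes exactly the inputs where Python A raises (IndexError on segments[0] or on an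
-- empty unassigned segment; TypeError on `idx in None`) and the one corner where A yields
-- None in place of a set (non-falsy ring candidate with assigned=None and segments=[]),
-- a value outside the declared return type, cited in claim.json.
def Pre_merge_segments_to_rings (segments : List (List Int)) (candidate : Option (List Int)) (assigned : Option (List Int)) : Prop :=
  if candidate = none ∨ candidate = some [] then
    segments ≠ [] ∧ ∀ s ∈ segments, s ≠ []
  else
    if assigned.isSome then
      ∀ p ∈ PySem.List.enumerate segments 0, p.2 ≠ [] ∨ PySem.Set.contains (assigned.getD []) p.1 = true
    else
      segments = [] ∧ (candidate.getD []).head? ≠ (candidate.getD []).getLast?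
instance (segments : List (List Int)) (candidate : Option (List Int)) (assigned : Option (List Int)) : Decidable (Pre_merge_segments_to_rings segments candidate assigned) := by unfold Pre_merge_segments_to_rings; infer_instance

def pvWitness_merge_segments_to_rings : List (List Int) × Option (List Int) × Option (List Int) :=
  ([[1, 2], [2, 1]], none, none)

def Spec_merge_segments_to_rings (segments : List (List Int)) (candidate : Option (List Int)) (assigned : Option (List Int)) (out : List (List Int × List Int)) : Prop := out = merge_segments_to_rings_alt segments candidate assigned
instance (segments : List (List Int)) (candidate : Option (List Int)) (assigned : Option (List Int)) (out : List (List Int × List Int)) : Decidable (Spec_merge_segments_to_rings segments candidate assigned out) := by unfold Spec_merge_segments_to_rings; infer_instance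

-- ===== CLAIM (what is proved, stated in full; the proofs are below) =====
def Claim_equal_merge_segments_to_rings : Prop := ∀ (segments : List (List Int)) (candidate : Option (List Int)) (assigned : Option (List Int)), Dom_merge_segments_to_rings segments candidate assigned → Pre_merge_segments_to_rings segments candidate assigned → Spec_merge_segments_to_rings segments candidate assigned (merge_segments_to_rings segments candidate assigned)

-- ===== LEMMAS AND PROOFS =====

-- number of unassigned segment indices: the termination measure of A's recursion
def pvFree (segments : List (List Int)) (asg : List Int) : Nat :=
  ((PySem.List.enumerate segments 0).filter (fun p => !PySem.Set.contains asg p.1)).length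

-- A's result with the canonical (minimal sufficient) fuel
def pvCanon (segments : List (List Int)) (st : List Int × List Int) : List (List Int × List Int) :=
  pvMergeRec segments (pvFree segments st.2 + 1) st.1 st.2

theorem pv_union_singleton (asg : List Int) (i : Int) :
    PySem.Set.union asg (PySem.Set.ofList [i]) = PySem.Set.add asg i := rfl

theorem pv_contains_add_ne (asg : List Int) (i j : Int) (h : j ≠ i) :
    PySem.Set.contains (PySem.Set.add asg i) j = PySem.Set.contains asg j := by
  simp only [PySem.Set.add, PySem.Set.contains]
  split <;> simp [h]

theorem pv_free_add_lt (segments : List (List Int)) (asg : List Int) (i : Int) (seg : List Int)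
    (hmem : (i, seg) ∈ PySem.List.enumerate segments 0)
    (hfree : PySem.Set.contains asg i = false) :
    pvFree segments (PySem.Set.add asg i) < pvFree segments asg := by
  unfold pvFree
  obtain ⟨s, t, hl⟩ := List.append_of_mem hmem
  have hpw : (PySem.List.enumerate segments 0).Pairwise (fun p q => p.1 < q.1) :=
    PySem.List.pairwise_lt_enumerate _ _
  rw [hl] at hpw
  rw [hl, List.filter_append, List.filter_append, List.filter_cons, List.filter_cons]
  rw [List.pairwise_append] at hpw
  obtain ⟨-, hpw2, hcross⟩ := hpw
  rw [List.pairwise_cons] at hpw2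
  have hs : ∀ p ∈ s, p.1 ≠ i := fun p hp =>
    ne_of_lt (hcross p hp (i, seg) (List.mem_cons_self))
  have ht : ∀ p ∈ t, p.1 ≠ i := fun p hp => (ne_of_lt (hpw2.1 p hp)).symm
  have hfs : ∀ p ∈ s, (!PySem.Set.contains (PySem.Set.add asg i) p.1) =
      (!PySem.Set.contains asg p.1) := fun p hp => by
    rw [pv_contains_add_ne asg i p.1 (hs p hp)]
  have hft : ∀ p ∈ t, (!PySem.Set.contains (PySem.Set.add asg i) p.1) =
      (!PySem.Set.contains asg p.1) := fun p hp => by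
    rw [pv_contains_add_ne asg i p.1 (ht p hp)]
  rw [List.filter_congr hfs, List.filter_congr hft]
  have hfree' : i ∉ asg := by simpa [PySem.Set.contains] using hfree
  simp only [List.length_append]
  simp [hfree']

theorem pv_ext_length (segments : List (List Int)) (cand used : List Int) :
    (pvExtensions segments cand used).length ≤ pvFree segments used := by
  unfold pvExtensions pvFree
  generalize PySem.List.enumerate segments 0 = l
  induction l with
  | nil => simp
  | cons p l ih =>
    rw [List.filterMap_cons, List.filter_cons]
    by_cases hc : PySem.Set.contains used p.1
    · simp only [hc, if_true, Bool.not_true]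
      exact ih
    · simp only [hc, Bool.false_eq_true, if_false, Bool.not_false, if_true, List.length_cons]
      split <;> (try simp only [List.length_cons]) <;> omega

theorem pv_ext_free (segments : List (List Int)) (cand used : List Int)
    (st : List Int × List Int) (hst : st ∈ pvExtensions segments cand used) :
    pvFree segments st.2 < pvFree segments used := by
  unfold pvExtensions at hst
  obtain ⟨p, hp, hsome⟩ := List.mem_filterMap.1 hst
  by_cases hc : PySem.Set.contains used p.1 = true
  · rw [if_pos hc] at hsome; cases hsome
  · simp only [hc, Bool.false_eq_true, if_false] at hsome
    have hc' : PySem.Set.contains used p.1 = false := by simpa using hc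
    have hkey : st.2 = PySem.Set.add used p.1 := by
      split at hsome
      · cases hsome; simp [pv_union_singleton]
      · split at hsome
        · cases hsome; simp [pv_union_singleton]
        · cases hsome
    rw [hkey]
    exact pv_free_add_lt segments used p.1 p.2 (by simpa using hp) hc'

theorem pv_fuel_insensitive (segments : List (List Int)) :
    ∀ (k f g : Nat) (cand asg : List Int), pvFree segments asg ≤ k →
      pvFree segments asg < f → pvFree segments asg < g →
      pvMergeRec segments f cand asg = pvMergeRec segments g cand asg := by
  intro k
  induction k with
  | zero =>
    intro f g cand asg hk hf hg
    match f, g with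
    | f'+1, g'+1 =>
      simp only [pvMergeRec]
      congr 1
      refine List.flatMap_congr (fun p hp => ?_)
      by_cases hc : PySem.Set.contains asg p.1 = true
      · rw [if_pos hc, if_pos hc]
      · have hc' : PySem.Set.contains asg p.1 = false := by simpa using hc
        have hlt := pv_free_add_lt segments asg p.1 p.2 (by simpa using hp) hc'
        omega
  | succ k ih =>
    intro f g cand asg hk hf hg
    match f, g with
    | f'+1, g'+1 =>
      simp only [pvMergeRec]
      congr 1
      refine List.flatMap_congr (fun p hp => ?_)
      by_cases hc : PySem.Set.contains asg p.1 = true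
      · rw [if_pos hc, if_pos hc]
      · have hc' : PySem.Set.contains asg p.1 = false := by simpa using hc
        have hlt := pv_free_add_lt segments asg p.1 p.2 (by simpa using hp) hc'
        rw [if_neg hc, if_neg hc, pv_union_singleton]
        split
        · exact ih f' g' _ _ (by omega) (by omega) (by omega)
        · split
          · exact ih f' g' _ _ (by omega) (by omega) (by omega)
          · rfl

theorem pv_flatMap_filterMap {α β γ : Type} (l : List α) (h : α → Option β) (G : β → List γ) :
    (l.filterMap h).flatMap G = l.flatMap (fun x => ((h x).map G).getD []) := by
  induction l with
  | nil => rfl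
  | cons x l ih => rw [List.filterMap_cons]; cases hx : h x <;> simp [hx, ih]

theorem pv_canon_step (segments : List (List Int)) (cand asg : List Int) :
    pvCanon segments (cand, asg) =
      (if PySem.List.pyGet? cand 0 = PySem.List.pyGet? cand (-1) then [(cand, asg)] else [])
      ++ (pvExtensions segments cand asg).flatMap (pvCanon segments) := by
  unfold pvExtensions
  rw [pv_flatMap_filterMap]
  conv_lhs => simp only [pvCanon]
  conv_lhs => simp only [pvMergeRec]
  congr 1
  refine List.flatMap_congr (fun p hp => ?_)
  by_cases hc : PySem.Set.contains asg p.1 = true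
  · rw [if_pos hc, if_pos hc]; rfl
  · have hc' : PySem.Set.contains asg p.1 = false := by simpa using hc
    have hlt := pv_free_add_lt segments asg p.1 p.2 (by simpa using hp) hc'
    rw [if_neg hc, if_neg hc, pv_union_singleton]
    split
    · simp only [Option.map_some, Option.getD_some, pvCanon]
      exact pv_fuel_insensitive segments (pvFree segments asg) _ _ _ _ (by omega) hlt (by omega)
    · split
      · simp only [Option.map_some, Option.getD_some, pvCanon]
        exact pv_fuel_insensitive segments (pvFree segments asg) _ _ _ _ (by omega) hlt (by omega)
      · rfl

theorem pv_stack_eq (segments : List (List Int)) :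
    ∀ (F : Nat) (stack : List (List Int × List Int)),
      (stack.map (fun st => Nat.factorial (pvFree segments st.2 + 2))).sum ≤ F →
      pvStackLoop segments F stack = stack.flatMap (pvCanon segments) := by
  intro F
  induction F with
  | zero =>
    intro stack hs
    match stack with
    | [] => rfl
    | (cand, used) :: rest =>
      exfalso
      simp only [List.map_cons, List.sum_cons] at hs
      have := Nat.factorial_pos (pvFree segments used + 2)
      omega
  | succ F ih =>
    intro stack hs
    match stack with
    | [] => rfl
    | (cand, used) :: rest =>
      simp only [List.map_cons, List.sum_cons] at hs
      simp only [pvStackLoop, List.flatMap_cons]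
      have hbound : ((pvExtensions segments cand used ++ rest).map
          (fun st => Nat.factorial (pvFree segments st.2 + 2))).sum ≤ F := by
        rw [List.map_append, List.sum_append]
        set f := pvFree segments used with hf
        have hlen : (pvExtensions segments cand used).length ≤ f := pv_ext_length segments cand used
        have hsum : ((pvExtensions segments cand used).map
            (fun st => Nat.factorial (pvFree segments st.2 + 2))).sum ≤
            (pvExtensions segments cand used).length * Nat.factorial (f + 1) := by
          have := List.sum_le_card_nsmul ((pvExtensions segments cand used).map
              (fun st => Nat.factorial (pvFree segments st.2 + 2))) (Nat.factorial (f + 1))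
              (by
                intro x hx
                obtain ⟨st, hst, hxe⟩ := List.mem_map.1 hx
                have hlt := pv_ext_free segments cand used st hst
                subst hxe
                exact Nat.factorial_le (by omega))
          simpa [smul_eq_mul] using this
        have hmul : (pvExtensions segments cand used).length * Nat.factorial (f + 1) ≤
            f * Nat.factorial (f + 1) := Nat.mul_le_mul_right _ hlen
        have hfact : Nat.factorial (f + 2) = (f + 2) * Nat.factorial (f + 1) :=
          Nat.factorial_succ _
        have hpos : 0 < Nat.factorial (f + 1) := Nat.factorial_pos _
        have hexp : (f + 2) * Nat.factorial (f + 1) =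
            f * Nat.factorial (f + 1) + 2 * Nat.factorial (f + 1) := by ring
        omega
      rw [ih _ hbound, List.flatMap_append, ← List.append_assoc, ← pv_canon_step]

theorem pv_free_le (segments : List (List Int)) (asg : List Int) :
    pvFree segments asg ≤ segments.length := by
  unfold pvFree
  calc ((PySem.List.enumerate segments 0).filter _).length
      ≤ (PySem.List.enumerate segments 0).length := List.length_filter_le _ _
    _ = segments.length := PySem.List.length_enumerate _ _

theorem pv_top (segments : List (List Int)) (init : List Int × List Int) :
    pvMergeRec segments (segments.length + 1) init.1 init.2 =
      pvStackLoop segments (Nat.factorial (segments.length + 2)) [init] := by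
  have h1 : pvMergeRec segments (segments.length + 1) init.1 init.2 = pvCanon segments init :=
    pv_fuel_insensitive segments (segments.length) _ _ init.1 init.2
      (pv_free_le segments init.2)
      (by have := pv_free_le segments init.2; omega) (Nat.lt_succ_self _)
  have h2 : pvStackLoop segments (Nat.factorial (segments.length + 2)) [init]
      = pvCanon segments init := by
    have := pv_stack_eq segments (Nat.factorial (segments.length + 2)) [init]
      (by
        simp only [List.map_cons, List.map_nil, List.sum_cons, List.sum_nil, Nat.add_zero]
        exact Nat.factorial_le (by have := pv_free_le segments init.2; omega))
    simpa using this
  rw [h1, h2]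

-- ===== VERDICT (by name: the statement is the Claim_ definition above) =====
theorem merge_segments_to_rings_spec : Claim_equal_merge_segments_to_rings := by
  intro segments candidate assigned _ _
  unfold Spec_merge_segments_to_rings merge_segments_to_rings merge_segments_to_rings_alt
  match candidate with
  | none => exact pv_top segments _
  | some [] => exact pv_top segments _
  | some (x :: t) => exact pv_top segments _
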